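-- pv_equiv track=rewrite | github.com/rlafl7942/CodingTest | 프로그래머스/1/135808. 과일 장수/과일 장수.py | solution
-- ===== SOURCE A (Python) =====
-- def solution(k, m, score):
--     score = sorted(score, reverse=True)
--     answer = 0
--     index = 0
--
--     while index + m <= len(score):
--         answer += min(score[index:index+m]) * m
--         index += m
--
--     return answer
-- ===== SOURCE B (Python) =====
-- def solution(k, m, score):
--     # Frequency-map approach: no per-element sort of the full list. Build a count
--     # map, walk the distinct values in ascending order keeping a running position
--     # 'pos' in the (virtual) sorted array; the minima of the full boxes sit at the
--     # arithmetic progression r, r+m, r+2m, ... (r = len % m), so each value v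
--     # contributes v times the number of progression points inside its run [pos, pos+c).
--     counts = {}
--     for v in score:
--         counts[v] = counts.get(v, 0) + 1
--     n = len(score)
--     r = n % m
--
--     def below(x):
--         # number of progression points r, r+m, ... strictly below x
--         return 0 if x <= r else (x - r + m - 1) // m
--
--     total = 0
--     pos = 0
--     for v in sorted(counts):
--         c = counts[v]
--         total += v * (below(pos + c) - below(pos))
--         pos += c
--     return m * total
-- ===== Notes on version B (the rewrite author's own statement) =====
-- stated objective: alternative
-- what changed: A reverse-sorts the whole list and loops taking min() of each m-slice; B never sorts the list: it builds a value->count map in one pass, sorts only the distinct values, and walks them once with a running position, counting arithmetically how many box-minimum positions (r, r+m, ...) fall inside each value's run.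
import Mathlib
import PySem

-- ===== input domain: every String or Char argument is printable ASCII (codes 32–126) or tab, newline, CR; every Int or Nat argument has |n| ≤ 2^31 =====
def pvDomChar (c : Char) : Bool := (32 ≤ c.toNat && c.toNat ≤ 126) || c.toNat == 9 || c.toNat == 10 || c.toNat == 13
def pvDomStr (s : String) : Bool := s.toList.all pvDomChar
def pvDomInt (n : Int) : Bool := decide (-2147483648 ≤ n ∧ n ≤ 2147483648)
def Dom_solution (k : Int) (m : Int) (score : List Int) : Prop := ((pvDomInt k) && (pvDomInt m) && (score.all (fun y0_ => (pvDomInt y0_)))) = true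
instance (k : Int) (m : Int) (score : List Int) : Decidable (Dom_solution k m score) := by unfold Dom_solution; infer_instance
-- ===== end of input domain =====

-- B replaces A's full reverse-sort + while-loop of slice minima by a frequency map:
-- sort only the distinct values and count arithmetically how many box-minimum positions
-- fall inside each value's run (objective: alternative; no claim of measured speed).

-- ===== PORT A =====
-- the while-loop of A: state (index, answer); fuel bounds the iteration count
-- (n/m + 1 ≤ length + 1 iterations whenever m ≥ 1, so the fuel given below never runs out).
def solutionLoopA (s : List Int) (m : Int) : Nat → Int → Int → Int
  | 0, _, answer => answer
  | fuel + 1, index, answer =>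
    if index + m ≤ (s.length : Int) then
      match PySem.List.min? (PySem.List.slice s (some index) (some (index + m))) (fun x => x) with
      | some mn => solutionLoopA s m fuel (index + m) (answer + mn * m)
      | none => answer  -- Python raises ValueError here (min of empty slice); outside Pre_solution
    else answer

def solution (k : Int) (m : Int) (score : List Int) : Int :=
  let s := PySem.List.sorted score (fun x => x) true
  solutionLoopA s m (s.length + 1) 0 0

-- ===== PORT B =====
def solution_alt (k : Int) (m : Int) (score : List Int) : Int :=
  let counts : PySem.Dict Int Int :=
    score.foldl (fun d v => d.insert v (d.getD v 0 + 1)) PySem.Dict.empty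
  let n : Int := (score.length : Int)
  let r : Int := PySem.Int.mod n m
  let below : Int → Int :=
    fun x => if x ≤ r then 0 else PySem.Int.floordiv (x - r + m - 1) m
  let res := (PySem.List.sorted counts.keys (fun x => x) false).foldl
      (fun (tp : Int × Int) v =>
        -- counts[v]: v is one of counts' keys here, so the Python lookup never raises
        let c := counts.getD v 0
        (tp.1 + v * (below (tp.2 + c) - below tp.2), tp.2 + c))
      (0, 0)
  m * res.1

-- ===== PRECONDITION & SPEC =====
-- Pre_ excludes m ≤ 0, on which Python A always raises ValueError (min() of an empty slice;
-- for m = 0 on the first iteration, for m < 0 once the sliding slice becomes empty).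
def Pre_solution (k : Int) (m : Int) (score : List Int) : Prop := 1 ≤ m
instance (k : Int) (m : Int) (score : List Int) : Decidable (Pre_solution k m score) := by unfold Pre_solution; infer_instance
def pvWitness_solution : Int × Int × List Int := (4, 2, [1, 4, 2, 3])

def Spec_solution (k : Int) (m : Int) (score : List Int) (out : Int) : Prop := out = solution_alt k m score
instance (k : Int) (m : Int) (score : List Int) (out : Int) : Decidable (Spec_solution k m score out) := by unfold Spec_solution; infer_instance

-- ===== CLAIM (what is proved, stated in full; the proofs are below) =====
def Claim_equal_solution : Prop := ∀ (k : Int) (m : Int) (score : List Int), Dom_solution k m score → Pre_solution k m score → Spec_solution k m score (solution k m score)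

-- ===== LEMMAS AND PROOFS =====

-- ---- A-side characterisation ----

-- reverse sort of ints = reverse of the ascending sort
theorem pv_sorted_rev_eq (score : List Int) :
    PySem.List.sorted score (fun x => x) true
      = (PySem.List.sorted score (fun x => x) false).reverse := by
  have hperm : (PySem.List.sorted score (fun x => x) true).Perm
      ((PySem.List.sorted score (fun x => x) false).reverse) := by
    have h1 := PySem.List.sorted_perm score (fun x => x) true
    have h2 := PySem.List.sorted_perm score (fun x => x) false
    exact h1.trans ((h2.symm).trans (List.reverse_perm _).symm)
  have hp1 : List.Pairwise (fun a b : Int => b ≤ a) (PySem.List.sorted score (fun x => x) true) := by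
    simpa using PySem.List.sorted_pairwise_rev score (fun x => x)
  have hp2 : List.Pairwise (fun a b : Int => b ≤ a)
      ((PySem.List.sorted score (fun x => x) false).reverse) := by
    rw [List.pairwise_reverse]
    simpa using PySem.List.sorted_pairwise score (fun x => x)
  exact List.Perm.eq_of_pairwise (fun a b _ _ h1 h2 => le_antisymm h2 h1) hp1 hp2 hperm

-- the minimum fold over a descending list is its last element
theorem pv_foldl_min_desc (l : List Int) : ∀ (x : Int),
    List.Pairwise (fun a b : Int => b ≤ a) (x :: l) →
    List.foldl min x l = (x :: l).getLast (by simp) := by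
  induction l with
  | nil => intro x _; simp
  | cons y ys ih =>
    intro x hp
    have hyx : y ≤ x := (List.pairwise_cons.mp hp).1 y (by simp)
    simp only [List.foldl_cons]
    rw [min_eq_right hyx, ih y hp.of_cons]
    exact (List.getLast_cons (by simp)).symm

-- A's loop, characterised: it adds m times the sum of the last elements of the full chunks
theorem pv_loopA_eq (d : List Int) (m : Int) (hm : 1 ≤ m)
    (hd : List.Pairwise (fun a b : Int => b ≤ a) d) :
    ∀ (fuel : Nat) (j : Nat) (answer : Int), d.length < fuel + j →
    solutionLoopA d m fuel (j : Int) answer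
      = answer + m * ∑ i ∈ Finset.range ((d.length - j) / m.toNat),
          d.getD (j + (i + 1) * m.toNat - 1) 0 := by
  intro fuel
  induction fuel with
  | zero =>
    intro j answer h
    have h0 : d.length - j = 0 := by omega
    simp [solutionLoopA, h0]
  | succ fuel ih =>
    intro j answer h
    have hmm : 1 ≤ m.toNat := by omega
    have hmmi : (m.toNat : Int) = m := by omega
    by_cases hc : (j : Int) + m ≤ (d.length : Int)
    · have hjm : j + m.toNat ≤ d.length := by omega
      have hslice : PySem.List.slice d (some (j : Int)) (some ((j : Int) + m)) =
          (d.drop j).take m.toNat := by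
        rw [PySem.List.slice_toNat d (by positivity) (by omega)]
        congr 1
        omega
      obtain ⟨x, rest, hchunk⟩ : ∃ x rest, (d.drop j).take m.toNat = x :: rest := by
        cases hl : (d.drop j).take m.toNat with
        | nil =>
          exfalso
          have := congrArg List.length hl
          simp [List.length_take] at this
          omega
        | cons a b => exact ⟨a, b, rfl⟩
      have hpchunk : List.Pairwise (fun a b : Int => b ≤ a) (x :: rest) := by
        rw [← hchunk]
        exact List.Pairwise.sublist (List.take_sublist _ _) (hd.drop)
      have hlenchunk : (x :: rest).length = m.toNat := by
        rw [← hchunk]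
        simp [List.length_take]
        omega
      have hlast : List.foldl min x rest = d.getD (j + m.toNat - 1) 0 := by
        rw [pv_foldl_min_desc rest x hpchunk, List.getLast_eq_getElem]
        have hidx : (x :: rest).length - 1 < ((d.drop j).take m.toNat).length := by
          rw [hchunk]; omega
        have : (x :: rest)[(x :: rest).length - 1] =
            ((d.drop j).take m.toNat)[(x :: rest).length - 1]'hidx := by
          congr 1
          exact hchunk.symm
        rw [this, List.getElem_take, List.getElem_drop,
            List.getD_eq_getElem d 0 (by simp at hidx ⊢; omega)]
        congr 1
        simp [List.length_take] at hidx
        omega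
      show (if (j : Int) + m ≤ (d.length : Int) then _ else _) = _
      rw [if_pos hc, hslice, hchunk, PySem.List.min?_id_cons]
      show solutionLoopA d m fuel ((j : Int) + m) (answer + (List.foldl min x rest) * m) = _
      have hcast : (j : Int) + m = ((j + m.toNat : Nat) : Int) := by push_cast; omega
      rw [hlast, hcast, ih (j + m.toNat) _ (by omega)]
      have hq : (d.length - j) / m.toNat = (d.length - (j + m.toNat)) / m.toNat + 1 := by
        have hsplit : d.length - j = (d.length - (j + m.toNat)) + m.toNat := by omega
        rw [hsplit, Nat.add_div_right _ (by omega)]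
      rw [hq, Finset.sum_range_succ']
      have hterm : ∀ i : Nat, j + (i + 1 + 1) * m.toNat - 1 = j + m.toNat + (i + 1) * m.toNat - 1 := by
        intro i
        have : (i + 1 + 1) * m.toNat = m.toNat + (i + 1) * m.toNat := by ring
        omega
      have hsum : ∑ i ∈ Finset.range ((d.length - (j + m.toNat)) / m.toNat),
            d.getD (j + (i + 1 + 1) * m.toNat - 1) 0
          = ∑ i ∈ Finset.range ((d.length - (j + m.toNat)) / m.toNat),
            d.getD (j + m.toNat + (i + 1) * m.toNat - 1) 0 := by
        exact Finset.sum_congr rfl (fun i _ => by rw [hterm i])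
      rw [hsum]
      have h0 : j + (0 + 1) * m.toNat - 1 = j + m.toNat - 1 := by
        have : (0 + 1) * m.toNat = m.toNat := by ring
        omega
      rw [h0]
      ring
    · show (if (j : Int) + m ≤ (d.length : Int) then _ else _) = _
      rw [if_neg hc]
      have h0 : (d.length - j) / m.toNat = 0 := Nat.div_eq_of_lt (by omega)
      rw [h0]
      simp

-- reindexing: chunk-last positions in the reversed list = strided positions in the list
theorem pv_sum_reindex (t : List Int) (mm : Nat) (hmm : 1 ≤ mm) :
    ∑ i ∈ Finset.range (t.length / mm), t.reverse.getD ((i + 1) * mm - 1) 0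
      = ∑ i ∈ Finset.range (t.length / mm), t.getD (t.length % mm + i * mm) 0 := by
  rw [← Finset.sum_range_reflect (fun i => t.getD (t.length % mm + i * mm) 0) (t.length / mm)]
  apply Finset.sum_congr rfl
  intro i hi
  rw [Finset.mem_range] at hi
  have h1 : mm * (t.length / mm) + t.length % mm = t.length := Nat.div_add_mod _ _
  have h2 : (i + 1) * mm ≤ mm * (t.length / mm) := by
    calc (i + 1) * mm ≤ (t.length / mm) * mm := Nat.mul_le_mul_right _ (by omega)
      _ = mm * (t.length / mm) := Nat.mul_comm _ _
  have h1m : 1 * mm ≤ (i + 1) * mm := Nat.mul_le_mul_right _ (by omega)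
  have hX1 : 1 ≤ (i + 1) * mm := by omega
  have h3 : (t.length / mm - 1 - i) * mm = mm * (t.length / mm) - (i + 1) * mm := by
    have he : t.length / mm - 1 - i = t.length / mm - (i + 1) := by omega
    rw [he, Nat.sub_mul, Nat.mul_comm mm]
  have hidx : (i + 1) * mm - 1 < t.length := by omega
  rw [List.getD_eq_getElem t.reverse 0 (by simpa using hidx), List.getElem_reverse,
      List.getD_eq_getElem t 0 (by omega)]
  have hieq : t.length - 1 - ((i + 1) * mm - 1)
      = t.length % mm + (t.length / mm - 1 - i) * mm := by omega
  simp only [hieq]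

-- ---- B-side characterisation ----

-- the Nat form of B's 'below': number of progression points rN, rN+mm, ... strictly below x
def pv_belowN (rN mm x : Nat) : Nat := if x ≤ rN then 0 else (x - rN + mm - 1) / mm

theorem pv_belowN_lt_iff (rN mm : Nat) (hmm : 1 ≤ mm) (x j : Nat) :
    j < pv_belowN rN mm x ↔ rN + j * mm < x := by
  unfold pv_belowN
  split_ifs with h
  · constructor
    · omega
    · intro hlt; exfalso; nlinarith
  · rw [← Nat.add_one_le_iff, Nat.le_div_iff_mul_le (by omega)]
    have : (j + 1) * mm = j * mm + mm := by ring
    omega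

theorem pv_belowN_mono (rN mm : Nat) (hmm : 1 ≤ mm) {x y : Nat} (h : x ≤ y) :
    pv_belowN rN mm x ≤ pv_belowN rN mm y := by
  by_contra hcon
  have h1 : pv_belowN rN mm y < pv_belowN rN mm x := by omega
  have h2 := (pv_belowN_lt_iff rN mm hmm x (pv_belowN rN mm y)).mp h1
  have h3 := (pv_belowN_lt_iff rN mm hmm y (pv_belowN rN mm y)).mpr (by omega)
  omega

-- B's Int 'below' is the cast of pv_belowN on nonnegative inputs
theorem pv_below_bridge (m : Int) (hm : 1 ≤ m) (rN x : Nat) :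
    (if (x : Int) ≤ (rN : Int) then 0
      else PySem.Int.floordiv ((x : Int) - (rN : Int) + m - 1) m)
      = (pv_belowN rN m.toNat x : Int) := by
  unfold pv_belowN
  have hmmi : (m.toNat : Int) = m := by omega
  by_cases h : x ≤ rN
  · rw [if_pos (by exact_mod_cast h), if_pos h]; norm_num
  · rw [if_neg (by exact_mod_cast h), if_neg h]
    have hnum : (x : Int) - (rN : Int) + m - 1 = ((x - rN + m.toNat - 1 : Nat) : Int) := by
      omega
    rw [hnum, ← hmmi, PySem.Int.floordiv_natCast]
    simp

theorem pv_loopB (m : Int) (hm : 1 ≤ m) (rN : Nat) (cnt : Int → Nat) :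
    ∀ (ks : List Int) (pos : Nat) (total : Int),
    ks.foldl
      (fun (tp : Int × Int) v =>
        (tp.1 + v *
          ((if tp.2 + ((cnt v : Nat) : Int) ≤ (rN : Int) then 0
              else PySem.Int.floordiv (tp.2 + ((cnt v : Nat) : Int) - (rN : Int) + m - 1) m)
            - (if tp.2 ≤ (rN : Int) then 0
              else PySem.Int.floordiv (tp.2 - (rN : Int) + m - 1) m)),
          tp.2 + ((cnt v : Nat) : Int)))
      (total, (pos : Int))
    = (total + ∑ j ∈ Finset.Ico (pv_belowN rN m.toNat pos)
          (pv_belowN rN m.toNat (pos + (ks.flatMap (fun v => List.replicate (cnt v) v)).length)),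
          (ks.flatMap (fun v => List.replicate (cnt v) v)).getD (rN + j * m.toNat - pos) 0,
        ((pos + (ks.flatMap (fun v => List.replicate (cnt v) v)).length : Nat) : Int)) := by
  intro ks
  induction ks with
  | nil => intro pos total; simp
  | cons v rest ih =>
    intro pos total
    have hmm : 1 ≤ m.toNat := by omega
    set c := cnt v with hc
    set t' := rest.flatMap (fun v => List.replicate (cnt v) v) with ht'
    set b0 := pv_belowN rN m.toNat pos with hb0
    set b1 := pv_belowN rN m.toNat (pos + c) with hb1
    set b2 := pv_belowN rN m.toNat (pos + c + t'.length) with hb2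
    have hb01 : b0 ≤ b1 := pv_belowN_mono rN m.toNat hmm (by omega)
    have hb12 : b1 ≤ b2 := pv_belowN_mono rN m.toNat hmm (by omega)
    simp only [List.foldl_cons]
    -- the step's pair
    have hpos : ((pos : Int) + ((c : Nat) : Int)) = ((pos + c : Nat) : Int) := by push_cast; ring
    rw [hpos, pv_below_bridge m hm rN (pos + c), pv_below_bridge m hm rN pos]
    rw [ih (pos + c) (total + v * ((b1 : Int) - (b0 : Int)))]
    simp only [List.flatMap_cons, ← ht', ← hc]
    refine Prod.ext ?_ ?_
    · show total + v * ((b1 : Int) - (b0 : Int)) + _ = total + _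
      have hsplit : ∑ j ∈ Finset.Ico b0 (pv_belowN rN m.toNat
            (pos + (List.replicate c v ++ t').length)),
            (List.replicate c v ++ t').getD (rN + j * m.toNat - pos) 0
          = (∑ j ∈ Finset.Ico b0 b1, (List.replicate c v ++ t').getD (rN + j * m.toNat - pos) 0)
            + ∑ j ∈ Finset.Ico b1 b2, (List.replicate c v ++ t').getD (rN + j * m.toNat - pos) 0 := by
        rw [show pos + (List.replicate c v ++ t').length = pos + c + t'.length by simp; omega]
        exact (Finset.sum_Ico_consecutive _ hb01 hb12).symm
      rw [hsplit]
      have hfirst : ∑ j ∈ Finset.Ico b0 b1,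
            (List.replicate c v ++ t').getD (rN + j * m.toNat - pos) 0
          = v * ((b1 : Int) - (b0 : Int)) := by
        have hconst : ∀ j ∈ Finset.Ico b0 b1,
            (List.replicate c v ++ t').getD (rN + j * m.toNat - pos) 0 = v := by
          intro j hj
          rw [Finset.mem_Ico] at hj
          have h1 : rN + j * m.toNat < pos + c :=
            (pv_belowN_lt_iff rN m.toNat hmm (pos + c) j).mp hj.2
          have h2 : pos ≤ rN + j * m.toNat := by
            by_contra hcon
            exact absurd ((pv_belowN_lt_iff rN m.toNat hmm pos j).mpr (by omega))
              (by omega)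
          have hidx : rN + j * m.toNat - pos < c := by omega
          have hidx' : rN + j * m.toNat - pos < (List.replicate c v).length := by
            simp [hidx]
          rw [List.getD_append _ _ _ _ hidx']
          simp [List.getD, hidx]
        rw [Finset.sum_congr rfl hconst, Finset.sum_const, Nat.card_Ico, nsmul_eq_mul]
        rw [Nat.cast_sub hb01]
        ring
      have hsecond : ∑ j ∈ Finset.Ico b1 b2,
            (List.replicate c v ++ t').getD (rN + j * m.toNat - pos) 0
          = ∑ j ∈ Finset.Ico b1 b2, t'.getD (rN + j * m.toNat - (pos + c)) 0 := by
        apply Finset.sum_congr rfl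
        intro j hj
        rw [Finset.mem_Ico] at hj
        have h2 : pos + c ≤ rN + j * m.toNat := by
          by_contra hcon
          exact absurd ((pv_belowN_lt_iff rN m.toNat hmm (pos + c) j).mpr (by omega))
            (by omega)
        have hge : (List.replicate c v).length ≤ rN + j * m.toNat - pos := by
          simp; omega
        rw [List.getD_append_right _ _ _ _ hge]
        congr 1
        simp
        omega
      rw [hfirst, hsecond]
      ring
    · show ((pos + c : Nat) : Int) + (t'.length : Int) = _
      simp
      ring

-- run-length count of a nodup value list
theorem pv_rle_count (ks : List Int) (hks : ks.Nodup) (cnt : Int → Nat) (w : Int) :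
    (ks.flatMap (fun v => List.replicate (cnt v) v)).count w
      = if w ∈ ks then cnt w else 0 := by
  induction ks with
  | nil => simp
  | cons v rest ih =>
    have hnd : rest.Nodup := hks.of_cons
    simp only [List.flatMap_cons, List.count_append, List.count_replicate, ih hnd,
      List.mem_cons]
    by_cases hwv : w = v
    · subst hwv
      have : w ∉ rest := (List.nodup_cons.mp hks).1
      simp [this]
    · simp [hwv, Ne.symm hwv]

-- replicated runs in strictly increasing value order are (≤)-sorted
theorem pv_rle_pairwise (ks : List Int) (hks : ks.Pairwise (· < ·)) (cnt : Int → Nat) :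
    (ks.flatMap (fun v => List.replicate (cnt v) v)).Pairwise (· ≤ ·) := by
  induction ks with
  | nil => simp
  | cons v rest ih =>
    simp only [List.flatMap_cons]
    rw [List.pairwise_append]
    refine ⟨List.pairwise_replicate.mpr (by simp), ih hks.of_cons, ?_⟩
    intro a ha b hb
    have hav : a = v := List.eq_of_mem_replicate ha
    obtain ⟨u, hu, hb'⟩ := List.mem_flatMap.mp hb
    have hbu : b = u := List.eq_of_mem_replicate hb'
    have := (List.pairwise_cons.mp hks).1 u hu
    omega

-- run-length decomposition: a (<)-sorted list of the distinct values of a (≤)-sorted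
-- list, each replicated by its multiplicity, reassembles that list
theorem pv_rle (ks s' : List Int) (hks : ks.Pairwise (· < ·))
    (hs : s'.Pairwise (· ≤ ·)) (hmem : ∀ v, v ∈ ks ↔ v ∈ s') :
    ks.flatMap (fun v => List.replicate (s'.count v) v) = s' := by
  have hnd : ks.Nodup := hks.nodup
  have hperm : (ks.flatMap (fun v => List.replicate (s'.count v) v)).Perm s' := by
    rw [List.perm_iff_count]
    intro w
    rw [pv_rle_count ks hnd _ w]
    by_cases hw : w ∈ ks
    · simp [hw]
    · have : w ∉ s' := fun h => hw ((hmem w).mpr h)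
      simp [hw, List.count_eq_zero_of_not_mem this]
  exact hperm.eq_of_pairwise (fun a b _ _ h1 h2 => le_antisymm h1 h2)
    (pv_rle_pairwise ks hks _) hs

-- endpoints of the progression count
theorem pv_belowN_zero (rN mm : Nat) : pv_belowN rN mm 0 = 0 := by
  unfold pv_belowN
  simp

theorem pv_belowN_full (mm n : Nat) (hmm : 1 ≤ mm) :
    pv_belowN (n % mm) mm n = n / mm := by
  have hdm := Nat.div_add_mod n mm
  have hcomm : mm * (n / mm) = (n / mm) * mm := Nat.mul_comm _ _
  apply Nat.le_antisymm
  · by_contra hcon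
    have h1 : n / mm < pv_belowN (n % mm) mm n := by omega
    have h3 := (pv_belowN_lt_iff (n % mm) mm hmm n (n / mm)).mp h1
    omega
  · rcases Nat.eq_zero_or_pos (n / mm) with hq | hq
    · omega
    · have hsub : (n / mm - 1) * mm + mm = (n / mm) * mm := by
        calc (n / mm - 1) * mm + mm = (n / mm - 1 + 1) * mm := by ring
          _ = (n / mm) * mm := by rw [Nat.sub_add_cancel hq]
      have := (pv_belowN_lt_iff (n % mm) mm hmm n (n / mm - 1)).mpr (by omega)
      omega

-- B, characterised: m times the strided sum of the ascending sort
theorem pv_alt_eq (k m : Int) (score : List Int) (hm : 1 ≤ m) :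
    solution_alt k m score
      = m * ∑ i ∈ Finset.range ((PySem.List.sorted score (fun x => x) false).length / m.toNat),
          (PySem.List.sorted score (fun x => x) false).getD
            ((PySem.List.sorted score (fun x => x) false).length % m.toNat + i * m.toNat) 0 := by
  have hmm : 1 ≤ m.toNat := by omega
  have hmmi : (m.toNat : Int) = m := by omega
  set s := PySem.List.sorted score (fun x => x) false with hsdef
  set rN := s.length % m.toNat with hrN
  set ks := PySem.List.sorted (PySem.Set.ofList score) (fun x => x) false with hksdef
  have hlen : s.length = score.length := by
    rw [hsdef]; exact PySem.List.length_sorted score (fun x => x) false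
  have hr : PySem.Int.mod ((score.length : Int)) m = ((rN : Nat) : Int) := by
    rw [← hmmi, ← hlen]
    exact_mod_cast PySem.Int.mod_natCast s.length m.toNat
  have hcnt : ∀ v : Int, (PySem.Dict.counter score).getD v 0 = ((s.count v : Nat) : Int) := by
    intro v
    rw [PySem.Dict.getD_counter]
    congr 1
    exact ((PySem.List.sorted_perm score (fun x => x) false).count_eq v).symm
  have hflat : ks.flatMap (fun v => List.replicate (s.count v) v) = s := by
    apply pv_rle
    · exact PySem.List.sorted_ofList_pairwise_lt score
    · simpa using PySem.List.sorted_pairwise score (fun x => x)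
    · intro v
      rw [hksdef, PySem.List.mem_sorted, PySem.Set.mem_ofList, hsdef, PySem.List.mem_sorted]
  have hloop := pv_loopB m hm rN (fun v => s.count v) ks 0 0
  rw [hflat] at hloop
  simp only [Nat.cast_zero, zero_add, Nat.sub_zero] at hloop
  simp only [solution_alt, PySem.Dict.foldl_insert_getD_add_one_eq_counter,
    PySem.Dict.keys_counter, hr, hcnt, ← hksdef]
  rw [hloop]
  rw [pv_belowN_zero, pv_belowN_full m.toNat s.length hmm, ← Finset.range_eq_Ico]

-- ===== VERDICT (by name: the statement is the Claim_ definition above) =====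
theorem solution_spec : Claim_equal_solution := by
  unfold Claim_equal_solution
  intro k m score _ hpre
  unfold Pre_solution at hpre
  unfold Spec_solution
  show solutionLoopA (PySem.List.sorted score (fun x => x) true) m
      ((PySem.List.sorted score (fun x => x) true).length + 1) 0 0 = solution_alt k m score
  rw [pv_sorted_rev_eq score]
  have hpair : List.Pairwise (fun a b : Int => b ≤ a)
      ((PySem.List.sorted score (fun x => x) false).reverse) := by
    rw [List.pairwise_reverse]
    simpa using PySem.List.sorted_pairwise score (fun x => x)
  have hmain := pv_loopA_eq ((PySem.List.sorted score (fun x => x) false).reverse) m hpre hpair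
    ((PySem.List.sorted score (fun x => x) false).reverse.length + 1) 0 0 (by omega)
  simp only [Nat.cast_zero, Nat.sub_zero, zero_add, List.length_reverse] at hmain
  simp only [List.length_reverse]
  rw [hmain, pv_sum_reindex _ m.toNat (by omega), pv_alt_eq k m score hpre]
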